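-- pv_equiv track=rewrite | github.com/Jingkzhou/python_data_lineage | main_to_csv.py | _find_top_level_keyword
-- ===== SOURCE A (Python) =====
-- def _find_top_level_keyword(text: str, keyword: str, start: int = 0) -> int:
--     keyword_upper = keyword.upper()
--     text_upper = text.upper()
--     in_single = False
--     in_double = False
--     depth = 0
--     i = start
--     while i < len(text):
--         ch = text[i]
--         if ch == "'" and not in_double:
--             if in_single and i + 1 < len(text) and text[i + 1] == "'":
--                 i += 2
--                 continue
--             in_single = not in_single
--             i += 1
--             continue
--         if ch == '"' and not in_single:
--             if in_double and i + 1 < len(text) and text[i + 1] == '"':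
--                 i += 2
--                 continue
--             in_double = not in_double
--             i += 1
--             continue
--         if in_single or in_double:
--             i += 1
--             continue
--         if ch == '(':
--             depth += 1
--             i += 1
--             continue
--         if ch == ')':
--             depth = max(depth - 1, 0)
--             i += 1
--             continue
--         if depth == 0 and text_upper.startswith(keyword_upper, i):
--             before = text_upper[i - 1] if i > 0 else ' '
--             after = text_upper[i + len(keyword)] if i + len(keyword) < len(text) else ' '
--             if not before.isalnum() and before != '_' and not after.isalnum() and after != '_':
--                 return i
--         i += 1
--     return -1
-- ===== SOURCE B (Python) =====
-- def _skip_string(text, quote, j):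
--     """Return the index just past the quoted string whose opening quote char is
--     `quote` and whose body starts at `j`; doubled quotes are escapes; an
--     unterminated string consumes the rest of the text."""
--     n = len(text)
--     while j < n:
--         if text[j] == quote:
--             if j + 1 < n and text[j + 1] == quote:
--                 j += 2
--             else:
--                 return j + 1
--         else:
--             j += 1
--     return n
--
--
-- def _word_boundary(text_upper, i, klen, n):
--     before = text_upper[i - 1] if i > 0 else ' '
--     after = text_upper[i + klen] if i + klen < n else ' '
--     return (not before.isalnum() and before != '_'
--             and not after.isalnum() and after != '_')
--
--
-- def _find_top_level_keyword(text: str, keyword: str, start: int = 0) -> int: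
--     # Tokenizing scanner: each quoted string is consumed whole by _skip_string,
--     # so no in_single/in_double state is carried through the main loop.
--     keyword_upper = keyword.upper()
--     text_upper = text.upper()
--     klen = len(keyword)
--     n = len(text)
--     depth = 0
--     i = start
--     while i < n:
--         ch = text[i]
--         if ch == "'" or ch == '"':
--             i = _skip_string(text, ch, i + 1)
--         elif ch == '(':
--             depth += 1
--             i += 1
--         elif ch == ')':
--             depth = max(depth - 1, 0)
--             i += 1
--         elif depth == 0 and text_upper.startswith(keyword_upper, i) \
--                 and _word_boundary(text_upper, i, klen, n):
--             return i
--         else: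
--             i += 1
--     return -1
-- ===== Notes on version B (the rewrite author's own statement) =====
-- stated objective: alternative
-- what changed: Replaces A's single loop carrying in_single/in_double boolean quote-state with a tokenizing scanner: a dedicated _skip_string helper consumes each quoted string (with doubled-quote escapes) whole, so the main loop only sees top-level characters and keeps just the paren depth.
import Mathlib
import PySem

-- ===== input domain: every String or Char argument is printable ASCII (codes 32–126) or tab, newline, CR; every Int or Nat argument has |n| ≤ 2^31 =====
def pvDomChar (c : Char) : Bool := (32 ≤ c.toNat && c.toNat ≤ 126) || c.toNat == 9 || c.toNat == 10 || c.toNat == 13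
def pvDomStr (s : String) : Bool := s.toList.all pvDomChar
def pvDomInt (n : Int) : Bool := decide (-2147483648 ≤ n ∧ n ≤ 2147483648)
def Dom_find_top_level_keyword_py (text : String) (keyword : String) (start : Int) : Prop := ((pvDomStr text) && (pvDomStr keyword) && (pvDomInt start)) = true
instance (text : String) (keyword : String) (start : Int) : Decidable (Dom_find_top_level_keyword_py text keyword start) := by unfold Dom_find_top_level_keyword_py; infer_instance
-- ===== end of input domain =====

-- B replaces A's boolean quote-state machine by a tokenizing scanner that consumes each
-- quoted string with a dedicated skip helper (objective: alternative; same asymptotic cost).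

-- Shared primitive: Python's s.startswith(p, i) with an int start, exact per CPython
-- (negative start counts from the end and clamps at 0; start past len(s) is False).
def pvStartswithFrom (s p : List Char) (i : Int) : Bool :=
  let j : Int := if i < 0 then max (i + s.length) 0 else i
  if j > (s.length : Int) then false else p.isPrefixOf (s.drop j.toNat)

-- ===== PORT A =====
-- A's while-loop, one step per fuel unit; fuel starts at (len(text) - start).toNat, which bounds the
-- number of iterations, so the fuel-0 clause is never the reason the loop stops.
def pvALoop (t tu ku : List Char) (klen : Nat) : Nat → Bool → Bool → Int → Int → Int
  | 0, _, _, _, _ => -1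
  | fuel+1, ins, ind, depth, i =>
    if i < (t.length : Int) then
      -- text[i]; in range whenever the Python A returns, i.e. inside Pre_
      let ch := PySem.List.pyGetD t i ' '
      if ch = '\'' ∧ ¬(ind = true) then
        if ins = true ∧ i + 1 < (t.length : Int) ∧ PySem.List.pyGetD t (i+1) ' ' = '\'' then
          pvALoop t tu ku klen fuel ins ind depth (i+2)
        else
          pvALoop t tu ku klen fuel (!ins) ind depth (i+1)
      else if ch = '"' ∧ ¬(ins = true) then
        if ind = true ∧ i + 1 < (t.length : Int) ∧ PySem.List.pyGetD t (i+1) ' ' = '"' then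
          pvALoop t tu ku klen fuel ins ind depth (i+2)
        else
          pvALoop t tu ku klen fuel ins (!ind) depth (i+1)
      else if ins = true ∨ ind = true then
        pvALoop t tu ku klen fuel ins ind depth (i+1)
      else if ch = '(' then
        pvALoop t tu ku klen fuel ins ind (depth + 1) (i+1)
      else if ch = ')' then
        pvALoop t tu ku klen fuel ins ind (max (depth - 1) 0) (i+1)
      else if depth = 0 ∧ pvStartswithFrom tu ku i = true then
        let before := if 0 < i then PySem.List.pyGetD tu (i-1) ' ' else ' '
        let after := if i + (klen : Int) < (t.length : Int) then PySem.List.pyGetD tu (i + (klen : Int)) ' ' else ' '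
        if ¬(PySem.Chars.isalnum before = true) ∧ before ≠ '_' ∧ ¬(PySem.Chars.isalnum after = true) ∧ after ≠ '_' then
          i
        else
          pvALoop t tu ku klen fuel ins ind depth (i+1)
      else
        pvALoop t tu ku klen fuel ins ind depth (i+1)
    else -1

def find_top_level_keyword_py (text : String) (keyword : String) (start : Int) : Int :=
  pvALoop text.toList (PySem.Chars.upper text.toList) (PySem.Chars.upper keyword.toList)
    keyword.toList.length (((text.toList.length : Int) - start).toNat) false false 0 start

-- ===== PORT B =====
-- Source B's _skip_string(text, quote, j): index just past the quoted string whose body starts at j.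
-- Fuel bounds the iteration count exactly as in pvALoop.
def pvSkipString (t : List Char) (q : Char) : Nat → Int → Int
  | 0, _ => (t.length : Int)
  | fuel+1, j =>
    if j < (t.length : Int) then
      if PySem.List.pyGetD t j ' ' = q then
        if j + 1 < (t.length : Int) ∧ PySem.List.pyGetD t (j+1) ' ' = q then
          pvSkipString t q fuel (j+2)
        else j + 1
      else pvSkipString t q fuel (j+1)
    else (t.length : Int)

-- Source B's _word_boundary
def pvWordBoundary (tu : List Char) (i : Int) (klen : Nat) (n : Int) : Bool :=
  let before := if 0 < i then PySem.List.pyGetD tu (i-1) ' ' else ' '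
  let after := if i + (klen : Int) < n then PySem.List.pyGetD tu (i + (klen : Int)) ' ' else ' '
  !(PySem.Chars.isalnum before) && !(before == '_') && !(PySem.Chars.isalnum after) && !(after == '_')

-- Source B's main loop: no in_single/in_double state; quoted strings are consumed whole.
def pvBLoop (t tu ku : List Char) (klen : Nat) : Nat → Int → Int → Int
  | 0, _, _ => -1
  | fuel+1, depth, i =>
    if i < (t.length : Int) then
      let ch := PySem.List.pyGetD t i ' '
      if ch = '\'' ∨ ch = '"' then
        pvBLoop t tu ku klen fuel depth (pvSkipString t ch (((t.length : Int) - (i+1)).toNat) (i+1))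
      else if ch = '(' then
        pvBLoop t tu ku klen fuel (depth + 1) (i+1)
      else if ch = ')' then
        pvBLoop t tu ku klen fuel (max (depth - 1) 0) (i+1)
      else if depth = 0 ∧ pvStartswithFrom tu ku i = true ∧ pvWordBoundary tu i klen (t.length : Int) = true then
        i
      else
        pvBLoop t tu ku klen fuel depth (i+1)
    else -1

def find_top_level_keyword_py_alt (text : String) (keyword : String) (start : Int) : Int :=
  pvBLoop text.toList (PySem.Chars.upper text.toList) (PySem.Chars.upper keyword.toList)
    keyword.toList.length (((text.toList.length : Int) - start).toNat) 0 start

-- ===== PRECONDITION & SPEC =====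
-- Pre_ excludes exactly the inputs where the Python A raises IndexError:
-- start < -len(text) makes the first text[i] access go out of range.
def Pre_find_top_level_keyword_py (text : String) (keyword : String) (start : Int) : Prop :=
  -(text.toList.length : Int) ≤ start
instance (text : String) (keyword : String) (start : Int) : Decidable (Pre_find_top_level_keyword_py text keyword start) := by unfold Pre_find_top_level_keyword_py; infer_instance

def pvWitness_find_top_level_keyword_py : String × String × Int := ("SELECT a FROM (SELECT 1) t", "from", 0)

def Spec_find_top_level_keyword_py (text : String) (keyword : String) (start : Int) (out : Int) : Prop := out = find_top_level_keyword_py_alt text keyword start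
instance (text : String) (keyword : String) (start : Int) (out : Int) : Decidable (Spec_find_top_level_keyword_py text keyword start out) := by unfold Spec_find_top_level_keyword_py; infer_instance

-- ===== CLAIM (what is proved, stated in full; the proofs are below) =====
def Claim_equal_find_top_level_keyword_py : Prop := ∀ (text : String) (keyword : String) (start : Int), Dom_find_top_level_keyword_py text keyword start → Pre_find_top_level_keyword_py text keyword start → Spec_find_top_level_keyword_py text keyword start (find_top_level_keyword_py text keyword start)

-- ===== LEMMAS AND PROOFS =====

-- lower bound on the skip destination
theorem pvSkipString_ge (t : List Char) (q : Char) :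
    ∀ (f : Nat) (j : Int), min (j + 1) ((t.length : Int)) ≤ pvSkipString t q f j := by
  intro f
  induction f with
  | zero => intro j; simp [pvSkipString]
  | succ f ih =>
    intro j
    simp only [pvSkipString]
    split_ifs
    · have := ih (j+2); omega
    · omega
    · have := ih (j+1); omega
    · omega

-- fuel irrelevance for pvSkipString: any sufficient fuel computes the same index
theorem pvSkipString_irrel (t : List Char) (q : Char) :
    ∀ (k f g : Nat) (j : Int), ((t.length : Int) - j).toNat ≤ k →
      ((t.length : Int) - j).toNat ≤ f → ((t.length : Int) - j).toNat ≤ g →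
      pvSkipString t q f j = pvSkipString t q g j := by
  intro k
  induction k with
  | zero =>
    intro f g j hk hf hg
    have hj : ¬ j < (t.length : Int) := by omega
    cases f <;> cases g <;> simp [pvSkipString, hj]
  | succ k ih =>
    intro f g j hk hf hg
    by_cases hj : j < (t.length : Int)
    · obtain ⟨f, rfl⟩ : ∃ f', f = f' + 1 := ⟨f - 1, by omega⟩
      obtain ⟨g, rfl⟩ : ∃ g', g = g' + 1 := ⟨g - 1, by omega⟩
      simp only [pvSkipString, if_pos hj]
      split_ifs
      · exact ih f g (j+2) (by omega) (by omega) (by omega)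
      · rfl
      · exact ih f g (j+1) (by omega) (by omega) (by omega)
    · cases f <;> cases g <;> simp [pvSkipString, hj]


-- both loops return -1 once the scan position passes the end (any fuel)
theorem pvALoop_stop (t tu ku : List Char) (klen : Nat) (f : Nat) (ins ind : Bool) (depth i : Int)
    (h : ¬ i < (t.length : Int)) : pvALoop t tu ku klen f ins ind depth i = -1 := by
  cases f <;> simp [pvALoop, h]

theorem pvBLoop_stop (t tu ku : List Char) (klen : Nat) (g : Nat) (depth i : Int)
    (h : ¬ i < (t.length : Int)) : pvBLoop t tu ku klen g depth i = -1 := by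
  cases g <;> simp [pvBLoop, h]

-- fuel irrelevance for pvALoop
theorem pvALoop_irrel (t tu ku : List Char) (klen : Nat) :
    ∀ (k f g : Nat) (ins ind : Bool) (depth i : Int), ((t.length : Int) - i).toNat ≤ k →
      ((t.length : Int) - i).toNat ≤ f → ((t.length : Int) - i).toNat ≤ g →
      pvALoop t tu ku klen f ins ind depth i = pvALoop t tu ku klen g ins ind depth i := by
  intro k
  induction k with
  | zero =>
    intro f g ins ind depth i hk hf hg
    have hi : ¬ i < (t.length : Int) := by omega
    cases f <;> cases g <;> simp [pvALoop, hi]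
  | succ k ih =>
    intro f g ins ind depth i hk hf hg
    by_cases hi : i < (t.length : Int)
    · obtain ⟨f, rfl⟩ : ∃ f', f = f' + 1 := ⟨f - 1, by omega⟩
      obtain ⟨g, rfl⟩ : ∃ g', g = g' + 1 := ⟨g - 1, by omega⟩
      simp only [pvALoop, if_pos hi]
      split_ifs
      all_goals first
        | rfl
        | exact ih f g _ _ _ _ (by omega) (by omega) (by omega)
    · cases f <;> cases g <;> simp [pvALoop, hi]

-- A's loop in the in_single state from position i equals A's loop in the clean state
-- from the position just past the single-quoted string.
theorem pvA_single (t tu ku : List Char) (klen : Nat) :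
    ∀ (k f g : Nat) (depth i : Int), ((t.length : Int) - i).toNat ≤ k →
      ((t.length : Int) - i).toNat ≤ f →
      ((t.length : Int) - pvSkipString t '\'' (((t.length : Int) - i).toNat) i).toNat ≤ g →
      pvALoop t tu ku klen f true false depth i
        = pvALoop t tu ku klen g false false depth (pvSkipString t '\'' (((t.length : Int) - i).toNat) i) := by
  intro k
  induction k with
  | zero =>
    intro f g depth i hk hf hg
    have h0 : ((t.length : Int) - i).toNat = 0 := by omega
    rw [h0]
    rw [pvALoop_stop t tu ku klen f _ _ depth i (by omega)]
    rw [show pvSkipString t _ 0 i = ((t.length : Int)) from rfl]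
    rw [pvALoop_stop t tu ku klen g false false depth _ (by omega)]
  | succ k ih =>
    intro f g depth i hk hf hg
    by_cases hi : i < (t.length : Int)
    · have hfu : ((t.length : Int) - i).toNat = (((t.length : Int) - (i+1)).toNat) + 1 := by omega
      obtain ⟨f, rfl⟩ : ∃ f', f = f' + 1 := ⟨f - 1, by omega⟩
      by_cases h1 : PySem.List.pyGetD t i ' ' = '\''
      · by_cases h2 : i + 1 < (t.length : Int) ∧ PySem.List.pyGetD t (i+1) ' ' = '\''
        · have hskip : pvSkipString t '\'' (((t.length : Int) - i).toNat) i
              = pvSkipString t '\'' (((t.length : Int) - (i+2)).toNat) (i+2) := by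
            rw [hfu]
            simp only [pvSkipString, if_pos hi, h1, if_pos h2, if_true]
            exact pvSkipString_irrel t '\'' (((t.length : Int) - (i+2)).toNat)
              _ _ (i+2) le_rfl (by omega) (by omega)
          rw [hskip] at hg ⊢
          simp only [pvALoop, if_pos hi]
          simp [h1, h2.1, h2.2]
          exact ih f g depth (i+2) (by omega) (by omega) hg
        · have hskip : pvSkipString t '\'' (((t.length : Int) - i).toNat) i = i + 1 := by
            rw [hfu]
            simp only [pvSkipString, if_pos hi, h1, if_true]
            rw [if_neg h2]
          rw [hskip] at hg ⊢
          simp only [pvALoop, if_pos hi]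
          simp [h1, h2]
          exact pvALoop_irrel t tu ku klen k f g false false depth (i+1) (by omega) (by omega) hg
      · have hskip : pvSkipString t '\'' (((t.length : Int) - i).toNat) i
            = pvSkipString t '\'' (((t.length : Int) - (i+1)).toNat) (i+1) := by
          rw [hfu]
          simp only [pvSkipString, if_pos hi, if_neg h1]
        rw [hskip] at hg ⊢
        simp only [pvALoop, if_pos hi]
        simp [h1]
        exact ih f g depth (i+1) (by omega) (by omega) hg
    · have h0 : ((t.length : Int) - i).toNat = 0 := by omega
      rw [h0]
      rw [pvALoop_stop t tu ku klen (f) _ _ depth i hi]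
      rw [show pvSkipString t _ 0 i = ((t.length : Int)) from rfl]
      rw [pvALoop_stop t tu ku klen g false false depth _ (by omega)]

theorem pvA_double (t tu ku : List Char) (klen : Nat) :
    ∀ (k f g : Nat) (depth i : Int), ((t.length : Int) - i).toNat ≤ k →
      ((t.length : Int) - i).toNat ≤ f →
      ((t.length : Int) - pvSkipString t '"' (((t.length : Int) - i).toNat) i).toNat ≤ g →
      pvALoop t tu ku klen f false true depth i
        = pvALoop t tu ku klen g false false depth (pvSkipString t '"' (((t.length : Int) - i).toNat) i) := by
  intro k
  induction k with
  | zero =>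
    intro f g depth i hk hf hg
    have h0 : ((t.length : Int) - i).toNat = 0 := by omega
    rw [h0]
    rw [pvALoop_stop t tu ku klen f _ _ depth i (by omega)]
    rw [show pvSkipString t _ 0 i = ((t.length : Int)) from rfl]
    rw [pvALoop_stop t tu ku klen g false false depth _ (by omega)]
  | succ k ih =>
    intro f g depth i hk hf hg
    by_cases hi : i < (t.length : Int)
    · have hfu : ((t.length : Int) - i).toNat = (((t.length : Int) - (i+1)).toNat) + 1 := by omega
      obtain ⟨f, rfl⟩ : ∃ f', f = f' + 1 := ⟨f - 1, by omega⟩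
      by_cases h1 : PySem.List.pyGetD t i ' ' = '"'
      · by_cases h2 : i + 1 < (t.length : Int) ∧ PySem.List.pyGetD t (i+1) ' ' = '"'
        · have hskip : pvSkipString t '"' (((t.length : Int) - i).toNat) i
              = pvSkipString t '"' (((t.length : Int) - (i+2)).toNat) (i+2) := by
            rw [hfu]
            simp only [pvSkipString, if_pos hi, h1, if_pos h2, if_true]
            exact pvSkipString_irrel t '"' (((t.length : Int) - (i+2)).toNat)
              _ _ (i+2) le_rfl (by omega) (by omega)
          rw [hskip] at hg ⊢
          simp only [pvALoop, if_pos hi]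
          simp [h1, h2.1, h2.2]
          exact ih f g depth (i+2) (by omega) (by omega) hg
        · have hskip : pvSkipString t '"' (((t.length : Int) - i).toNat) i = i + 1 := by
            rw [hfu]
            simp only [pvSkipString, if_pos hi, h1, if_true]
            rw [if_neg h2]
          rw [hskip] at hg ⊢
          simp only [pvALoop, if_pos hi]
          simp [h1, h2]
          exact pvALoop_irrel t tu ku klen k f g false false depth (i+1) (by omega) (by omega) hg
      · have hskip : pvSkipString t '"' (((t.length : Int) - i).toNat) i
            = pvSkipString t '"' (((t.length : Int) - (i+1)).toNat) (i+1) := by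
          rw [hfu]
          simp only [pvSkipString, if_pos hi, if_neg h1]
        rw [hskip] at hg ⊢
        simp only [pvALoop, if_pos hi]
        simp [h1]
        exact ih f g depth (i+1) (by omega) (by omega) hg
    · have h0 : ((t.length : Int) - i).toNat = 0 := by omega
      rw [h0]
      rw [pvALoop_stop t tu ku klen (f) _ _ depth i hi]
      rw [show pvSkipString t _ 0 i = ((t.length : Int)) from rfl]
      rw [pvALoop_stop t tu ku klen g false false depth _ (by omega)]

-- B's boolean word-boundary test is A's inline propositional test
theorem pvWordBoundary_eq_true_iff (tu : List Char) (i : Int) (klen : Nat) (n : Int) :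
    pvWordBoundary tu i klen n = true ↔
      (¬(PySem.Chars.isalnum (if 0 < i then PySem.List.pyGetD tu (i-1) ' ' else ' ') = true) ∧
        (if 0 < i then PySem.List.pyGetD tu (i-1) ' ' else ' ') ≠ '_' ∧
        ¬(PySem.Chars.isalnum (if i + (klen : Int) < n then PySem.List.pyGetD tu (i + (klen : Int)) ' ' else ' ') = true) ∧
        (if i + (klen : Int) < n then PySem.List.pyGetD tu (i + (klen : Int)) ' ' else ' ') ≠ '_') := by
  unfold pvWordBoundary
  simp [and_assoc]

-- the two main loops agree in the clean (outside-string) state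
theorem pvMain (t tu ku : List Char) (klen : Nat) :
    ∀ (k f g : Nat) (depth i : Int), ((t.length : Int) - i).toNat ≤ k →
      ((t.length : Int) - i).toNat ≤ f → ((t.length : Int) - i).toNat ≤ g →
      pvALoop t tu ku klen f false false depth i = pvBLoop t tu ku klen g depth i := by
  intro k
  induction k with
  | zero =>
    intro f g depth i hk hf hg
    have hi : ¬ i < (t.length : Int) := by omega
    rw [pvALoop_stop t tu ku klen f false false depth i hi,
      pvBLoop_stop t tu ku klen g depth i hi]
  | succ k ih =>
    intro f g depth i hk hf hg
    by_cases hi : i < (t.length : Int)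
    · obtain ⟨f, rfl⟩ : ∃ f', f = f' + 1 := ⟨f - 1, by omega⟩
      obtain ⟨g, rfl⟩ : ∃ g', g = g' + 1 := ⟨g - 1, by omega⟩
      simp only [pvALoop, pvBLoop, if_pos hi]
      by_cases h1 : PySem.List.pyGetD t i ' ' = '\''
      · rw [if_pos ⟨h1, Bool.false_ne_true⟩]
        rw [if_neg (show ¬(false = true ∧ i + 1 < (t.length : Int) ∧ PySem.List.pyGetD t (i+1) ' ' = '\'') from fun h => Bool.false_ne_true h.1)]
        rw [if_pos (Or.inl h1), Bool.not_false, h1]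
        have hge := pvSkipString_ge t '\'' (((t.length : Int) - (i+1)).toNat) (i+1)
        rw [pvA_single t tu ku klen k f g depth (i+1) (by omega) (by omega) (by omega)]
        exact ih g g depth _ (by omega) (by omega) (by omega)
      · have c1 : ¬(PySem.List.pyGetD t i ' ' = '\'' ∧ ¬false = true) := fun h => h1 h.1
        by_cases h2 : PySem.List.pyGetD t i ' ' = '"'
        · rw [if_neg c1, if_pos ⟨h2, Bool.false_ne_true⟩]
          rw [if_neg (show ¬(false = true ∧ i + 1 < (t.length : Int) ∧ PySem.List.pyGetD t (i+1) ' ' = '"') from fun h => Bool.false_ne_true h.1)]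
          rw [if_pos (Or.inr h2), Bool.not_false, h2]
          have hge := pvSkipString_ge t '"' (((t.length : Int) - (i+1)).toNat) (i+1)
          rw [pvA_double t tu ku klen k f g depth (i+1) (by omega) (by omega) (by omega)]
          exact ih g g depth _ (by omega) (by omega) (by omega)
        · have c2 : ¬(PySem.List.pyGetD t i ' ' = '"' ∧ ¬false = true) := fun h => h2 h.1
          have c3 : ¬(false = true ∨ false = true) :=
            fun h => h.elim Bool.false_ne_true Bool.false_ne_true
          have cq : ¬(PySem.List.pyGetD t i ' ' = '\'' ∨ PySem.List.pyGetD t i ' ' = '"') :=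
            fun h => h.elim h1 h2
          by_cases hp : PySem.List.pyGetD t i ' ' = '('
          · rw [if_neg c1, if_neg c2, if_neg c3, if_pos hp, if_neg cq, if_pos hp]
            exact ih f g (depth+1) (i+1) (by omega) (by omega) (by omega)
          · by_cases hq : PySem.List.pyGetD t i ' ' = ')'
            · rw [if_neg c1, if_neg c2, if_neg c3, if_neg hp, if_pos hq, if_neg cq, if_neg hp, if_pos hq]
              exact ih f g (max (depth-1) 0) (i+1) (by omega) (by omega) (by omega)
            · rw [if_neg c1, if_neg c2, if_neg c3, if_neg hp, if_neg hq, if_neg cq, if_neg hp, if_neg hq]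
              by_cases kd : depth = 0 ∧ pvStartswithFrom tu ku i = true
              · by_cases hb : pvWordBoundary tu i klen (t.length : Int) = true
                · rw [if_pos kd, if_pos ((pvWordBoundary_eq_true_iff tu i klen (t.length : Int)).mp hb),
                    if_pos ⟨kd.1, kd.2, hb⟩]
                · rw [if_pos kd,
                    if_neg (fun hbp => hb ((pvWordBoundary_eq_true_iff tu i klen (t.length : Int)).mpr hbp)),
                    if_neg (show ¬(depth = 0 ∧ pvStartswithFrom tu ku i = true ∧ pvWordBoundary tu i klen (t.length : Int) = true) from fun h => hb h.2.2)]
                  exact ih f g depth (i+1) (by omega) (by omega) (by omega)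
              · rw [if_neg kd,
                  if_neg (show ¬(depth = 0 ∧ pvStartswithFrom tu ku i = true ∧ pvWordBoundary tu i klen (t.length : Int) = true) from fun h => kd ⟨h.1, h.2.1⟩)]
                exact ih f g depth (i+1) (by omega) (by omega) (by omega)
    · rw [pvALoop_stop t tu ku klen _ false false depth i hi,
        pvBLoop_stop t tu ku klen _ depth i hi]

-- ===== VERDICT (by name: the statement is the Claim_ definition above) =====
theorem find_top_level_keyword_py_spec : Claim_equal_find_top_level_keyword_py := by
  intro text keyword start _hDom _hPre
  unfold Spec_find_top_level_keyword_py find_top_level_keyword_py find_top_level_keyword_py_alt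
  exact pvMain _ _ _ _ (((text.toList.length : Int) - start).toNat) _ _ 0 start le_rfl le_rfl le_rfl
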